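-- pv_equiv track=rewrite | github.com/reo11/AtCoder | atcoder/ABC/abc201-300/abc249/b.py | solve
-- ===== SOURCE A (Python) =====
-- from collections import defaultdict
--
-- large_chars = [chr(ord("A") + i) for i in range(26)]
--
-- def solve(text):
--     d = defaultdict(lambda: 0)
--     cnt = {
--         "large": 0,
--         "small": 0,
--     }
--     for c in list(text):
--         d[c] += 1
--         if d[c] > 1:
--             return False
--         if c in large_chars:
--             cnt["large"] += 1
--         else:
--             cnt["small"] += 1
--     if cnt["large"] > 0 and cnt["small"] > 0:
--         return True
--     else:
--         return False
-- ===== SOURCE B (Python) =====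
-- LARGE = set("ABCDEFGHIJKLMNOPQRSTUVWXYZ")
--
-- def solve(text):
--     # distinct chars, and at least one uppercase letter and one non-uppercase char
--     return (len(set(text)) == len(text)
--             and any(c in LARGE for c in text)
--             and any(c not in LARGE for c in text))
-- ===== Notes on version B (the rewrite author's own statement) =====
-- stated objective: simpler
-- what changed: Replaces the counting loop with early return (defaultdict of counts plus a large/small counter dict) by a one-line set-cardinality distinctness test and two independent any() scans for case mix.
import Mathlib
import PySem

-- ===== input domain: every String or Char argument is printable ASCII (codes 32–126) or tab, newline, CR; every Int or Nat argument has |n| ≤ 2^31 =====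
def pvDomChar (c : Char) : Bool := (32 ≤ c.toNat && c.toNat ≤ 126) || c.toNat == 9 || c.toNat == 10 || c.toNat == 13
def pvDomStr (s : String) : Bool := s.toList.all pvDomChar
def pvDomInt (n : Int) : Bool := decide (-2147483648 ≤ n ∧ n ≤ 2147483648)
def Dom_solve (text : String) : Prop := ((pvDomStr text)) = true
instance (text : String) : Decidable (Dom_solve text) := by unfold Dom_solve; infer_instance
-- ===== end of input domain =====

-- B replaces A's counting loop with a set-cardinality distinctness test plus two any-scans (simpler decomposition; same return value).

-- ===== PORT A =====
-- large_chars = [chr(ord("A") + i) for i in range(26)]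
def largeChars : List Char := (PySem.List.pyRange 0 26 1).map (fun i => Char.ofNat (65 + i).toNat)

-- the for-loop of A: state = (defaultdict d, cnt["large"], cnt["small"]); early 'return False' on a repeat
def solveLoop : List Char → PySem.Dict Char Int → Int → Int → Bool
  | [], _, large, small => decide (large > 0) && decide (small > 0)
  | c :: rest, d, large, small =>
    let d' := d.modify c 0 (· + 1)          -- d[c] += 1
    if d'.getD c 0 > 1 then false
    else if largeChars.contains c then solveLoop rest d' (large + 1) small
    else solveLoop rest d' large (small + 1)

def solve (text : String) : Bool := solveLoop text.toList PySem.Dict.empty 0 0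

-- ===== PORT B =====
-- LARGE = set("ABCDEFGHIJKLMNOPQRSTUVWXYZ")
def largeSet : PySem.Set Char := PySem.Set.ofList "ABCDEFGHIJKLMNOPQRSTUVWXYZ".toList

def solve_alt (text : String) : Bool :=
  let cs := text.toList
  decide ((PySem.Set.ofList cs).length = cs.length)
    && cs.any (fun c => PySem.Set.contains largeSet c)
    && cs.any (fun c => !PySem.Set.contains largeSet c)

-- ===== PRECONDITION & SPEC =====
def Spec_solve (text : String) (out : Bool) : Prop := out = solve_alt text
instance (text : String) (out : Bool) : Decidable (Spec_solve text out) := by unfold Spec_solve; infer_instance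

-- ===== CLAIM (what is proved, stated in full; the proofs are below) =====
def Claim_equal_solve : Prop := ∀ (text : String), Dom_solve text → Spec_solve text (solve text)

-- ===== LEMMAS AND PROOFS =====

-- pure model of A's loop: the dict is only used to detect a repeated character, so replace it by the list of seen characters
def modelLoop : List Char → List Char → Int → Int → Bool
  | [], _, large, small => decide (large > 0) && decide (small > 0)
  | c :: rest, seen, large, small =>
    if c ∈ seen then false
    else if largeChars.contains c then modelLoop rest (c :: seen) (large + 1) small
    else modelLoop rest (c :: seen) large (small + 1)

lemma solveLoop_eq_modelLoop (cs : List Char) (d : PySem.Dict Char Int) (seen : List Char)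
    (large small : Int)
    (H1 : ∀ c, 1 ≤ d.getD c 0 ↔ c ∈ seen) (H0 : ∀ c, 0 ≤ d.getD c 0) :
    solveLoop cs d large small = modelLoop cs seen large small := by
  induction cs generalizing d seen large small with
  | nil => rfl
  | cons c rest ih =>
    simp only [solveLoop, modelLoop, PySem.Dict.getD_modify_self]
    by_cases hc : c ∈ seen
    · have h1 : 1 ≤ d.getD c 0 := (H1 c).mpr hc
      rw [if_pos (by omega), if_pos hc]
    · have h1 : ¬ 1 ≤ d.getD c 0 := fun h => hc ((H1 c).mp h)
      rw [if_neg (by omega), if_neg hc]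
      have H1' : ∀ x, 1 ≤ (d.modify c 0 (· + 1)).getD x 0 ↔ x ∈ c :: seen := by
        intro x
        rw [PySem.Dict.getD_modify]
        by_cases hx : x = c
        · simp [hx]; have := H0 c; omega
        · simp [hx, H1 x]
      have H0' : ∀ x, 0 ≤ (d.modify c 0 (· + 1)).getD x 0 := by
        intro x
        rw [PySem.Dict.getD_modify]
        by_cases hx : x = c
        · simp [hx]; have := H0 c; omega
        · simp [hx, H0 x]
      by_cases hl : largeChars.contains c
      · rw [if_pos hl, if_pos hl, ih _ _ _ _ H1' H0']
      · rw [if_neg hl, if_neg hl, ih _ _ _ _ H1' H0']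

lemma modelLoop_spec (cs : List Char) (seen : List Char) (large small : Int) :
    modelLoop cs seen large small =
      decide ((cs.Nodup ∧ ∀ c ∈ cs, c ∉ seen)
        ∧ 0 < large + (cs.countP (fun c => largeChars.contains c) : Int)
        ∧ 0 < small + (cs.countP (fun c => !largeChars.contains c) : Int)) := by
  induction cs generalizing seen large small with
  | nil => simp [modelLoop, Bool.decide_and]
  | cons c rest ih =>
    simp only [modelLoop]
    by_cases hc : c ∈ seen
    · rw [if_pos hc]
      symm
      rw [decide_eq_false_iff_not]
      rintro ⟨⟨_, hall⟩, _⟩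
      exact hall c (List.mem_cons_self ..) hc
    · rw [if_neg hc]
      by_cases hl : largeChars.contains c
      · rw [if_pos hl, ih, decide_eq_decide]
        have hm : c ∈ largeChars := by simpa using hl
        have hcL : List.countP (fun c => largeChars.contains c) (c :: rest)
            = List.countP (fun c => largeChars.contains c) rest + 1 := by
          simp [hm]
        have hcS : List.countP (fun c => !largeChars.contains c) (c :: rest)
            = List.countP (fun c => !largeChars.contains c) rest := by
          simp [hm]
        rw [hcL, hcS]
        simp only [List.nodup_cons, List.mem_cons]
        push_cast
        constructor
        · rintro ⟨⟨hnd, hall⟩, h1, h2⟩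
          refine ⟨⟨⟨fun hm => hall c hm (Or.inl rfl), hnd⟩, ?_⟩, by omega, by omega⟩
          rintro x (rfl | hx)
          · exact hc
          · exact fun hs => hall x hx (Or.inr hs)
        · rintro ⟨⟨⟨hcr, hnd⟩, hall⟩, h1, h2⟩
          refine ⟨⟨hnd, ?_⟩, by omega, by omega⟩
          intro x hx
          rintro (rfl | hs)
          · exact hcr hx
          · exact hall x (Or.inr hx) hs
      · rw [if_neg hl, ih, decide_eq_decide]
        have hm : c ∉ largeChars := by simpa using hl
        have hcL : List.countP (fun c => largeChars.contains c) (c :: rest)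
            = List.countP (fun c => largeChars.contains c) rest := by
          simp [hm]
        have hcS : List.countP (fun c => !largeChars.contains c) (c :: rest)
            = List.countP (fun c => !largeChars.contains c) rest + 1 := by
          simp [hm]
        rw [hcL, hcS]
        simp only [List.nodup_cons, List.mem_cons]
        push_cast
        constructor
        · rintro ⟨⟨hnd, hall⟩, h1, h2⟩
          refine ⟨⟨⟨fun hm => hall c hm (Or.inl rfl), hnd⟩, ?_⟩, by omega, by omega⟩
          rintro x (rfl | hx)
          · exact hc
          · exact fun hs => hall x hx (Or.inr hs)
        · rintro ⟨⟨⟨hcr, hnd⟩, hall⟩, h1, h2⟩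
          refine ⟨⟨hnd, ?_⟩, by omega, by omega⟩
          intro x hx
          rintro (rfl | hs)
          · exact hcr hx
          · exact hall x (Or.inr hx) hs

lemma length_ofList_eq_iff_nodup (cs : List Char) :
    (PySem.Set.ofList cs).length = cs.length ↔ cs.Nodup := by
  induction cs with
  | nil => simp [PySem.Set.ofList_nil]
  | cons c rest ih =>
    rw [PySem.Set.ofList_cons]
    have hdisc : PySem.Set.discard (PySem.Set.ofList rest) c
        = (PySem.Set.ofList rest).filter (fun y => !(y == c)) := rfl
    by_cases hc : c ∈ rest
    · have hmem : c ∈ PySem.Set.ofList rest := (PySem.Set.mem_ofList rest c).mpr hc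
      have hlt : (PySem.Set.discard (PySem.Set.ofList rest) c).length < (PySem.Set.ofList rest).length := by
        rw [hdisc]
        exact List.length_filter_lt_length_iff_exists.mpr ⟨c, hmem, by simp⟩
      have hle := PySem.Set.length_ofList_le (xs := rest)
      simp only [List.length_cons, List.nodup_cons]
      constructor
      · intro h; omega
      · rintro ⟨h, _⟩; exact absurd hc h
    · have heq : PySem.Set.discard (PySem.Set.ofList rest) c = PySem.Set.ofList rest := by
        rw [hdisc]
        apply List.filter_eq_self.mpr
        intro x hx
        simp only [Bool.not_eq_eq_eq_not, Bool.not_true, beq_eq_false_iff_ne, ne_eq]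
        rintro rfl
        exact hc ((PySem.Set.mem_ofList rest x).mp hx)
      rw [heq]
      simp only [List.length_cons, List.nodup_cons]
      constructor
      · intro h; exact ⟨hc, ih.mp (by omega)⟩
      · rintro ⟨_, hnd⟩; have := ih.mpr hnd; omega

lemma largeSet_contains_eq (c : Char) :
    PySem.Set.contains largeSet c = largeChars.contains c := by
  have h : largeSet = largeChars := by decide
  rw [h]
  simp [PySem.Set.contains_eq_listContains]

lemma decide_exists_eq_any (l : List Char) (f : Char → Bool) :
    decide (∃ c ∈ l, f c = true) = l.any f := by
  rw [Bool.eq_iff_iff]; simp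

-- ===== VERDICT (by name: the statement is the Claim_ definition above) =====
theorem solve_spec : Claim_equal_solve := by
  intro text _
  unfold Spec_solve solve solve_alt
  rw [solveLoop_eq_modelLoop _ _ [] 0 0 (by simp [PySem.Dict.getD_empty]) (by simp [PySem.Dict.getD_empty]),
    modelLoop_spec]
  simp only [largeSet_contains_eq, List.not_mem_nil, not_false_eq_true, implies_true, and_true,
    zero_add, ← length_ofList_eq_iff_nodup, Bool.decide_and]
  rw [decide_eq_decide.mpr (Int.natCast_pos.trans List.countP_pos_iff),
    decide_eq_decide.mpr (Int.natCast_pos.trans List.countP_pos_iff),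
    decide_exists_eq_any, decide_exists_eq_any, Bool.and_assoc]
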